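-- pv_equiv track=rewrite | github.com/sublimator/EditPreferences | list_shortcut_keys.py | normalize_modifier_sequencing
-- ===== SOURCE A (Python) =====
-- def normalize_modifier_sequencing(keys):
--     rebuilt_key = []
--
--     for combo in keys:
--         keys          = combo.split('+')
--         rebuilt_combo = []
--
--         for mod in ('super', 'ctrl', 'alt', 'shift'):
--             if mod in keys:
--                 rebuilt_combo.append(keys.pop(keys.index(mod)))
--
--         rebuilt_combo.extend(keys)
--         rebuilt_key.append('+'.join(rebuilt_combo))
--
--     return ','.join(rebuilt_key)
-- ===== SOURCE B (Python) =====
-- def normalize_modifier_sequencing(keys):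
--     MODS = ('super', 'ctrl', 'alt', 'shift')
--     out = []
--     for combo in keys:
--         seen = set()
--         rest = []
--         for tok in combo.split('+'):
--             if tok in MODS and tok not in seen:
--                 seen.add(tok)
--             else:
--                 rest.append(tok)
--         out.append('+'.join([m for m in MODS if m in seen] + rest))
--     return ','.join(out)
-- ===== Notes on version B (the rewrite author's own statement) =====
-- stated objective: idiomatic
-- what changed: Replaces the four membership-scan + index/pop mutation passes per combo with a single left-to-right pass that records first-seen modifiers in a set and collects the rest, then emits the modifiers in canonical order followed by the rest.
import Mathlib
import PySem

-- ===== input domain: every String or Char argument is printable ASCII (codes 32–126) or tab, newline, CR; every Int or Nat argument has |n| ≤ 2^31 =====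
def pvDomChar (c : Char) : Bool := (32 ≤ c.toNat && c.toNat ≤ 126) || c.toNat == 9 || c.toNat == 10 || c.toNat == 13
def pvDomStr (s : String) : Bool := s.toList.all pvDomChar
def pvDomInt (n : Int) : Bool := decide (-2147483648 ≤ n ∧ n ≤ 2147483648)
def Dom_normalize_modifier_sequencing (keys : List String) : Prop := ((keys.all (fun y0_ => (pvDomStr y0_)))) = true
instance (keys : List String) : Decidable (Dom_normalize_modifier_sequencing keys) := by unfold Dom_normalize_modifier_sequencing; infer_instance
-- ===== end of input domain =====

-- B replaces A's four membership-scan+index/pop mutation passes per combo with one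
-- left-to-right pass over the tokens (seen-set + rest list); same return value, idiomatic.

-- ===== PORT A =====
-- combo.split('+'): sep is the non-empty "+", so Str.split? is always `some`; exact
def pvSplit (combo : String) : List String := (PySem.Str.split? combo "+").getD []

-- one iteration of A's `for mod in (…)` body: if mod in keys: rebuilt.append(keys.pop(keys.index(mod)))
def pvAStep (st : List String × List String) (mod : String) : List String × List String :=
  if mod ∈ st.2 then
    match PySem.List.index? st.2 mod with
    | some i =>
      match PySem.List.pop? st.2 (i : Int) with
      | some (x, rest) => (st.1 ++ [x], rest)
      | none => st
    | none => st
  else st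

def normalize_modifier_sequencing (keys : List String) : String :=
  let rebuilt_key := keys.foldl (fun rebuilt_key combo =>
    let ks := pvSplit combo
    let st := ["super", "ctrl", "alt", "shift"].foldl pvAStep ([], ks)
    rebuilt_key ++ [PySem.Str.join "+" (st.1 ++ st.2)]) []
  PySem.Str.join "," rebuilt_key

-- ===== PORT B =====
-- one iteration of B's token loop: first-seen modifiers go into the set, everything else into rest
def pvBStep (st : PySem.Set String × List String) (tok : String) : PySem.Set String × List String :=
  if tok ∈ ["super", "ctrl", "alt", "shift"] ∧ ¬ (PySem.Set.contains st.1 tok) then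
    (PySem.Set.add st.1 tok, st.2)
  else
    (st.1, st.2 ++ [tok])

def normalize_modifier_sequencing_alt (keys : List String) : String :=
  PySem.Str.join "," (keys.map (fun combo =>
    let st := (pvSplit combo).foldl pvBStep (PySem.Set.empty, [])
    PySem.Str.join "+"
      ((["super", "ctrl", "alt", "shift"].filter (fun m => PySem.Set.contains st.1 m)) ++ st.2)))

-- ===== PRECONDITION & SPEC =====
def Spec_normalize_modifier_sequencing (keys : List String) (out : String) : Prop := out = normalize_modifier_sequencing_alt keys
instance (keys : List String) (out : String) : Decidable (Spec_normalize_modifier_sequencing keys out) := by unfold Spec_normalize_modifier_sequencing; infer_instance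

-- ===== CLAIM (what is proved, stated in full; the proofs are below) =====
def Claim_equal_normalize_modifier_sequencing : Prop := ∀ (keys : List String), Dom_normalize_modifier_sequencing keys → Spec_normalize_modifier_sequencing keys (normalize_modifier_sequencing keys)

-- ===== LEMMAS AND PROOFS =====

-- A's step, in closed form: promote the first occurrence (= List.erase the value)
theorem pvAStep_eq (r ks : List String) (m : String) :
    pvAStep (r, ks) m = if m ∈ ks then (r ++ [m], ks.erase m) else (r, ks) := by
  by_cases h : m ∈ ks
  · obtain ⟨i, hi⟩ := Option.isSome_iff_exists.mp ((PySem.List.index?_isSome_iff ks m).mpr h)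
    obtain ⟨pre, suf, hks, hlen, hpre⟩ := (PySem.List.index?_eq_some_iff ks m i).mp hi
    obtain ⟨hk, hget, -⟩ := PySem.List.getElem_of_index?_eq_some hi
    have hpop := PySem.List.pop?_natCast ks i hk
    have herase : ks.eraseIdx i = ks.erase m := by
      subst hks
      rw [← hlen, List.erase_append_right _ hpre, List.erase_cons_head]
      simp [List.eraseIdx_append_of_length_le (le_refl pre.length)]
    unfold pvAStep
    simp only [if_pos h, hi, hpop, hget, herase]
  · simp [pvAStep, h]

-- A's modifier fold, in closed form (ms nodup)
theorem aFold_eq (ms : List String) (hnd : ms.Nodup) (r ks : List String) :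
    ms.foldl pvAStep (r, ks) =
      (r ++ ms.filter (fun m => decide (m ∈ ks)), ms.foldl List.erase ks) := by
  induction ms generalizing r ks with
  | nil => simp
  | cons m ms ih =>
    obtain ⟨hm, hnd'⟩ := List.nodup_cons.mp hnd
    rw [List.foldl_cons, pvAStep_eq, List.foldl_cons]
    by_cases h : m ∈ ks
    · rw [if_pos h, ih hnd']
      have hf : ms.filter (fun x => decide (x ∈ ks.erase m)) = ms.filter (fun x => decide (x ∈ ks)) := by
        refine List.filter_congr (fun x hx => ?_)
        have : x ≠ m := fun e => hm (e ▸ hx)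
        simp [List.mem_erase_of_ne this]
      rw [hf]
      simp [h, List.filter_cons, List.append_assoc]
    · rw [if_neg h, ih hnd', List.erase_of_not_mem h]
      simp [h, List.filter_cons]

-- B accumulator lemma
theorem bFold_acc (ts : List String) (s : PySem.Set String) (r : List String) :
    ts.foldl pvBStep (s, r) =
      ((ts.foldl pvBStep (s, [])).1, r ++ (ts.foldl pvBStep (s, [])).2) := by
  induction ts generalizing s r with
  | nil => simp
  | cons t ts ih =>
    rw [List.foldl_cons, List.foldl_cons]
    by_cases h : t ∈ ["super", "ctrl", "alt", "shift"] ∧ ¬ (PySem.Set.contains s t)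
    · simp only [pvBStep, if_pos h]
      exact ih (PySem.Set.add s t) r
    · simp only [pvBStep, if_neg h]
      rw [ih s (r ++ [t]), ih s ([] ++ [t])]
      simp

-- membership in B's final seen set
theorem bFold_seen_mem (ts : List String) (s : PySem.Set String) (r : List String) (x : String) :
    x ∈ (ts.foldl pvBStep (s, r)).1 ↔
      x ∈ s ∨ (x ∈ ["super", "ctrl", "alt", "shift"] ∧ x ∈ ts) := by
  induction ts generalizing s r with
  | nil => simp
  | cons t ts ih =>
    rw [List.foldl_cons]
    have hc : (PySem.Set.contains s t = true) ↔ t ∈ s := by simp [PySem.Set.contains]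
    by_cases h : t ∈ ["super", "ctrl", "alt", "shift"] ∧ ¬ (PySem.Set.contains s t)
    · simp only [pvBStep, if_pos h]
      rw [ih]
      rw [show (x ∈ PySem.Set.add s t) = (x ∈ s ∨ x = t) from propext (PySem.Set.mem_add s t x),
        show (x ∈ t :: ts) = (x = t ∨ x ∈ ts) from propext List.mem_cons]
      have h1' : x = t → x ∈ ["super", "ctrl", "alt", "shift"] := fun e => e ▸ h.1
      tauto
    · simp only [pvBStep, if_neg h]
      rw [ih]
      rw [show (x ∈ t :: ts) = (x = t ∨ x ∈ ts) from propext List.mem_cons]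
      push Not at h
      have h2 : x = t → x ∈ ["super", "ctrl", "alt", "shift"] → x ∈ s :=
        fun e hm => e ▸ hc.mp (h (e ▸ hm))
      tauto

-- fold of erase over a list containing t
theorem foldl_erase_cons_mem (L : List String) (t : String) (ts : List String) (h : t ∈ L) :
    L.foldl List.erase (t :: ts) = (L.erase t).foldl List.erase ts := by
  induction L generalizing ts with
  | nil => simp at h
  | cons m L ih =>
    by_cases hm : m = t
    · subst hm
      rw [List.foldl_cons, List.erase_cons_head, List.erase_cons_head]
    · have hne1 : ¬ ((t : String) == m) = true := by simp [Ne.symm hm]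
      have hne2 : ¬ ((m : String) == t) = true := by simp [hm]
      have ht : t ∈ L := by rcases List.mem_cons.mp h with rfl | ht; exact absurd rfl hm; exact ht
      rw [List.foldl_cons, List.erase_cons_tail hne1, ih (ts.erase m) ht,
        List.erase_cons_tail hne2, List.foldl_cons]

theorem foldl_erase_cons_not_mem (L : List String) (t : String) (ts : List String) (h : t ∉ L) :
    L.foldl List.erase (t :: ts) = t :: L.foldl List.erase ts := by
  induction L generalizing ts with
  | nil => simp
  | cons m L ih =>
    have hmt : ¬ ((t : String) == m) = true := by
      simp only [List.mem_cons, not_or] at h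
      simp [h.1]
    rw [List.foldl_cons, List.erase_cons_tail hmt, ih (ts.erase m) (fun hl => h (List.mem_cons_of_mem _ hl)),
      List.foldl_cons]

-- B's rest, in closed form
theorem bFold_rest (ts : List String) (s : PySem.Set String) :
    (ts.foldl pvBStep (s, [])).2 =
      (List.filter (fun m => decide (m ∉ s)) ["super", "ctrl", "alt", "shift"]).foldl List.erase ts := by
  induction ts generalizing s with
  | nil =>
    have : ∀ (L acc : List String), acc = [] → L.foldl List.erase acc = [] := by
      intro L
      induction L with
      | nil => intro acc h; simpa using h
      | cons m L ihL => intro acc h; subst h; rw [List.foldl_cons, List.erase_nil]; exact ihL [] rfl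
    simp [this _ [] rfl]
  | cons t ts ih =>
    have hnodup : (["super", "ctrl", "alt", "shift"] : List String).Nodup := by decide
    have hc : (PySem.Set.contains s t = true) ↔ t ∈ s := by simp [PySem.Set.contains]
    rw [List.foldl_cons]
    by_cases h : t ∈ ["super", "ctrl", "alt", "shift"] ∧ ¬ (PySem.Set.contains s t)
    · simp only [pvBStep, if_pos h]
      rw [ih]
      have htF : t ∈ List.filter (fun m => decide (m ∉ s)) ["super", "ctrl", "alt", "shift"] := by
        refine List.mem_filter.mpr ⟨h.1, by simpa [hc] using h.2⟩
      rw [foldl_erase_cons_mem _ _ _ htF]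
      congr 1
      rw [(List.Nodup.filter _ hnodup).erase_eq_filter t, List.filter_filter]
      refine List.filter_congr (fun x hx => ?_)
      simp only [PySem.Set.mem_add]
      by_cases hxs : x ∈ s <;> by_cases hxt : x = t <;> simp [hxs, hxt]
    · simp only [pvBStep, if_neg h]
      rw [bFold_acc ts s ([] ++ [t]), ih]
      have htF : t ∉ List.filter (fun m => decide (m ∉ s)) ["super", "ctrl", "alt", "shift"] := by
        intro hmem
        obtain ⟨h1, h2⟩ := List.mem_filter.mp hmem
        exact h ⟨h1, by simpa [hc] using h2⟩
      rw [foldl_erase_cons_not_mem _ _ _ htF]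
      simp

-- per-combo equality of the assembled token list
theorem combo_eq (ts : List String) :
    (let st := ["super", "ctrl", "alt", "shift"].foldl pvAStep ([], ts); st.1 ++ st.2) =
      (let st := ts.foldl pvBStep (PySem.Set.empty, []);
        (["super", "ctrl", "alt", "shift"].filter (fun m => PySem.Set.contains st.1 m)) ++ st.2) := by
  simp only
  rw [aFold_eq _ (by decide) [] ts, bFold_rest ts PySem.Set.empty]
  have hfe : List.filter (fun m => decide (m ∉ (PySem.Set.empty : PySem.Set String)))
      ["super", "ctrl", "alt", "shift"] = ["super", "ctrl", "alt", "shift"] := by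
    simp [PySem.Set.empty]
  rw [hfe]
  congr 1
  refine List.filter_congr (fun m hm => ?_)
  have := bFold_seen_mem ts PySem.Set.empty [] m
  simp only [PySem.Set.empty] at this
  have hc : (PySem.Set.contains (ts.foldl pvBStep (PySem.Set.empty, [])).1 m = true) ↔
      m ∈ (ts.foldl pvBStep (PySem.Set.empty, [])).1 := by simp [PySem.Set.contains]
  simp only [PySem.Set.empty]
  by_cases hts : m ∈ ts
  · simp [hc, this, hm, hts, PySem.Set.empty]
  · simp [hc, this, hm, hts, PySem.Set.empty]

-- per-combo result of A, named for the outer-loop rewrite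
def pvInnerA (combo : String) : String :=
  let ks := pvSplit combo
  let st := ["super", "ctrl", "alt", "shift"].foldl pvAStep ([], ks)
  PySem.Str.join "+" (st.1 ++ st.2)

theorem A_foldl_eq_map (keys : List String) (acc : List String) :
    keys.foldl (fun rebuilt_key combo =>
      let ks := pvSplit combo
      let st := ["super", "ctrl", "alt", "shift"].foldl pvAStep ([], ks)
      rebuilt_key ++ [PySem.Str.join "+" (st.1 ++ st.2)]) acc = acc ++ keys.map pvInnerA := by
  induction keys generalizing acc with
  | nil => simp
  | cons c cs ih =>
    rw [List.foldl_cons, ih, List.map_cons, List.append_assoc]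
    rfl

-- ===== VERDICT (by name: the statement is the Claim_ definition above) =====
theorem normalize_modifier_sequencing_spec : Claim_equal_normalize_modifier_sequencing := by
  intro keys _
  unfold Spec_normalize_modifier_sequencing normalize_modifier_sequencing normalize_modifier_sequencing_alt
  rw [A_foldl_eq_map]
  simp only [List.nil_append]
  refine congrArg _ (List.map_congr_left (fun combo _ => ?_))
  have h := combo_eq (pvSplit combo)
  simp only at h
  simpa [pvInnerA] using congrArg (PySem.Str.join "+") h
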